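-- pv_equiv track=rewrite | github.com/imabeastdrew/models | src/musicagent/eval/metrics.py | chord_lengths
-- ===== SOURCE A (Python) =====
-- from collections.abc import Sequence
--
-- def parse_chord_token(token: str) -> tuple[str | None, str | None]:
--     """Parse chord token like 'C:maj/0_on' -> (root, quality).
--
--     Returns (None, None) for special tokens (pad/sos/eos/rest) or unparseable.
--     """
--     if token.startswith('<') or token == 'rest':
--         return None, None
--
--     # Strip _on / _hold suffix
--     if token.endswith('_on'):
--         base = token[:-3]
--     elif token.endswith('_hold'):
--         base = token[:-5]
--     else:
--         return None, None
--
--     # Split root:quality/inversion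
--     try:
--         root, rest = base.split(':', 1)
--         quality = rest.split('/')[0]  # ignore inversion for pitch-class membership
--         return root, quality
--     except ValueError:
--         return None, None
--
-- def chord_lengths(chord_tokens: Sequence[str]) -> list[int]:
--     """Compute list of chord durations (in frames)."""
--     lengths: list[int] = []
--     current_len = 0
--     in_chord = False
--
--     for tok in chord_tokens:
--         root, _ = parse_chord_token(tok)
--         if root is None:
--             # Not a real chord (silence/special)
--             if in_chord:
--                 lengths.append(current_len)
--                 in_chord = False
--                 current_len = 0
--             continue
--
--         if tok.endswith('_on'):
--             if in_chord:
--                 lengths.append(current_len)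
--             current_len = 1
--             in_chord = True
--         elif tok.endswith('_hold'):
--             current_len += 1
--
--     if in_chord:
--         lengths.append(current_len)
--
--     return lengths
-- ===== SOURCE B (Python) =====
-- from collections.abc import Sequence
--
--
-- def parse_chord_token(token: str) -> tuple[str | None, str | None]:
--     """Parse chord token like 'C:maj/0_on' -> (root, quality).
--
--     Returns (None, None) for special tokens (pad/sos/eos/rest) or unparseable.
--     """
--     if token.startswith('<') or token == 'rest':
--         return None, None
--
--     if token.endswith('_on'):
--         base = token[:-3]
--     elif token.endswith('_hold'):
--         base = token[:-5]
--     else: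
--         return None, None
--
--     try:
--         root, rest = base.split(':', 1)
--         quality = rest.split('/')[0]
--         return root, quality
--     except ValueError:
--         return None, None
--
--
-- def chord_lengths(chord_tokens: Sequence[str]) -> list[int]:
--     """Compute list of chord durations (in frames)."""
--     # One pass: record every boundary token (chord onset, or non-chord break)
--     # as (index, is_onset); holds are not boundaries.  A sentinel closes the
--     # final chord.  Each onset's length is the gap to the next boundary.
--     bounds: list[tuple[int, bool]] = []
--     for i, tok in enumerate(chord_tokens):
--         root, _ = parse_chord_token(tok)
--         if root is None:
--             bounds.append((i, False))
--         elif tok.endswith('_on'):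
--             bounds.append((i, True))
--     bounds.append((len(chord_tokens), False))
--     return [bounds[j + 1][0] - bounds[j][0]
--             for j in range(len(bounds) - 1) if bounds[j][1]]
-- ===== Notes on version B (the rewrite author's own statement) =====
-- stated objective: alternative
-- what changed: Replaces A's running-counter state machine (current_len/in_chord mutated per token, with a trailing flush) by a boundary-index pass: one sweep records (index, is_onset) for every onset or break token plus a sentinel at len(chord_tokens), and each onset's duration is the difference to the next recorded boundary.
import Mathlib
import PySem

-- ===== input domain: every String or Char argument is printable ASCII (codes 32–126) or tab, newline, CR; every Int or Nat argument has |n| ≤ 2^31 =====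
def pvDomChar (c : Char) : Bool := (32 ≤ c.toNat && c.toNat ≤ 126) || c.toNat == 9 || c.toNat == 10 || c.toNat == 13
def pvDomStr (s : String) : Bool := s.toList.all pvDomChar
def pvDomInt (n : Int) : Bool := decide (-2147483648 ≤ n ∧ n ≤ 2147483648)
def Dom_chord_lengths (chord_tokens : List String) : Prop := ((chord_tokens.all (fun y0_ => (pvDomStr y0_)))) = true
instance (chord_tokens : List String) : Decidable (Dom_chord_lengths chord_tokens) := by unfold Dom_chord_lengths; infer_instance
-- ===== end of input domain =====

-- B replaces A's running-counter state machine by a boundary-index pass (record onset/break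
-- indices plus a sentinel, emit differences); same result, same O(n) cost ("alternative").


-- ===== PORT A =====
-- module helper parse_chord_token (used by both Pythons): the ':'-split unpack raises
-- ValueError exactly when splitMax? yields a single piece, caught → (none, none).
def parse_chord_token (token : String) : Option String × Option String :=
  if PySem.Str.startswith token "<" || token == "rest" then (none, none)
  else
    let base? : Option String :=
      if PySem.Str.endswith token "_on" then some (PySem.Str.slice token none (some (-3)))
      else if PySem.Str.endswith token "_hold" then some (PySem.Str.slice token none (some (-5)))
      else none
    match base? with
    | none => (none, none)
    | some base =>
      match PySem.Str.splitMax? base ":" 1 with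
      | some [root, rest] =>
        -- rest.split('/')[0]: split? with nonempty sep is some and nonempty, [0] = headD
        (some root, some (((PySem.Str.split? rest "/").getD []).headD ""))
      | _ => (none, none)

-- A's for-loop, transliterated as structural recursion over (lengths, current_len, in_chord)
def chordLoopA (acc : List Int) (cl : Int) (ic : Bool) : List String → List Int
  | [] => if ic then acc ++ [cl] else acc
  | tok :: rest =>
    match (parse_chord_token tok).1 with
    | none => if ic then chordLoopA (acc ++ [cl]) 0 false rest else chordLoopA acc cl ic rest
    | some _ =>
      if PySem.Str.endswith tok "_on" then
        chordLoopA (if ic then acc ++ [cl] else acc) 1 true rest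
      else if PySem.Str.endswith tok "_hold" then
        chordLoopA acc (cl + 1) ic rest
      else
        chordLoopA acc cl ic rest

def chord_lengths (chord_tokens : List String) : List Int :=
  chordLoopA [] 0 false chord_tokens

-- ===== PORT B =====
-- Source B's boundary-collecting loop: i is the running enumerate index
def altBounds (i : Int) : List String → List (Int × Bool)
  | [] => []
  | tok :: rest =>
    match (parse_chord_token tok).1 with
    | none => (i, false) :: altBounds (i + 1) rest
    | some _ =>
      if PySem.Str.endswith tok "_on" then (i, true) :: altBounds (i + 1) rest
      else altBounds (i + 1) rest

-- Source B's final comprehension over adjacent pairs bounds[j], bounds[j+1]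
def altEmit : List (Int × Bool) → List Int
  | (i, b) :: (j, c) :: rest => (if b then [j - i] else []) ++ altEmit ((j, c) :: rest)
  | _ => []

def chord_lengths_alt (chord_tokens : List String) : List Int :=
  altEmit (altBounds 0 chord_tokens ++ [((chord_tokens.length : Int), false)])

-- ===== PRECONDITION & SPEC =====
def Spec_chord_lengths (chord_tokens : List String) (out : List Int) : Prop := out = chord_lengths_alt chord_tokens
instance (chord_tokens : List String) (out : List Int) : Decidable (Spec_chord_lengths chord_tokens out) := by unfold Spec_chord_lengths; infer_instance

-- ===== CLAIM (what is proved, stated in full; the proofs are below) =====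
def Claim_equal_chord_lengths : Prop := ∀ (chord_tokens : List String), Dom_chord_lengths chord_tokens → Spec_chord_lengths chord_tokens (chord_lengths chord_tokens)

-- ===== LEMMAS AND PROOFS =====

-- Token class: 0 = break (no root), 1 = onset, 2 = hold.  Both loops branch only on this.
def clsOf (tok : String) : Nat :=
  match (parse_chord_token tok).1 with
  | none => 0
  | some _ => if PySem.Str.endswith tok "_on" then 1 else 2

-- class-level image of A's loop
def runA (acc : List Int) (cl : Int) (ic : Bool) : List Nat → List Int
  | [] => if ic then acc ++ [cl] else acc
  | 0 :: cs => if ic then runA (acc ++ [cl]) 0 false cs else runA acc cl ic cs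
  | 1 :: cs => runA (if ic then acc ++ [cl] else acc) 1 true cs
  | _ :: cs => runA acc (cl + 1) ic cs

-- class-level image of B's boundary pass
def bndC (i : Int) : List Nat → List (Int × Bool)
  | [] => []
  | 0 :: cs => (i, false) :: bndC (i + 1) cs
  | 1 :: cs => (i, true) :: bndC (i + 1) cs
  | _ :: cs => bndC (i + 1) cs

-- length of the leading run of holds
def holdRun : List Nat → Int
  | (_ + 2) :: cs => 1 + holdRun cs
  | _ => 0

-- common specification: one length (1 + following holds) per onset
def fSpec : List Nat → List Int
  | [] => []
  | 1 :: cs => (1 + holdRun cs) :: fSpec cs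
  | _ :: cs => fSpec cs

theorem parse_some_suffix (tok : String) (r : String)
    (h : (parse_chord_token tok).1 = some r) :
    PySem.Str.endswith tok "_on" = true ∨ PySem.Str.endswith tok "_hold" = true := by
  unfold parse_chord_token at h
  split_ifs at h with h1 h2 h3 <;> simp_all

theorem bridgeA (ts : List String) : ∀ (acc : List Int) (cl : Int) (ic : Bool),
    chordLoopA acc cl ic ts = runA acc cl ic (ts.map clsOf) := by
  induction ts with
  | nil => intro acc cl ic; rfl
  | cons tok rest ih =>
    intro acc cl ic
    simp only [List.map_cons, chordLoopA, clsOf]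
    cases hp : (parse_chord_token tok).1 with
    | none => cases ic <;> simp [runA, ih]
    | some r =>
      by_cases hon : PySem.Str.endswith tok "_on" = true
      · simp at hon
        simp [hon, runA, ih]
      · have hh : PySem.Str.endswith tok "_hold" = true := by
          rcases parse_some_suffix tok r hp with h | h
          · exact absurd h hon
          · exact h
        simp at hon hh
        simp [hon, hh, runA, ih]

theorem bridgeB (ts : List String) : ∀ (i : Int),
    altBounds i ts = bndC i (ts.map clsOf) := by
  induction ts with
  | nil => intro i; rfl
  | cons tok rest ih =>
    intro i
    simp only [List.map_cons, altBounds, clsOf]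
    cases hp : (parse_chord_token tok).1 with
    | none => simp [bndC, ih]
    | some r =>
      by_cases hon : PySem.Str.endswith tok "_on" = true
      · simp at hon
        simp [hon, bndC, ih]
      · have hh : PySem.Str.endswith tok "_hold" = true := by
          rcases parse_some_suffix tok r hp with h | h
          · exact absurd h hon
          · exact h
        simp at hon hh
        simp [hon, bndC, ih]

theorem runA_eq (cs : List Nat) : ∀ (acc : List Int) (cl : Int) (ic : Bool),
    runA acc cl ic cs = acc ++ (if ic then (cl + holdRun cs) :: fSpec cs else fSpec cs) := by
  induction cs with
  | nil => intro acc cl ic; cases ic <;> simp [runA, fSpec, holdRun]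
  | cons c cs ih =>
    intro acc cl ic
    match c with
    | 0 => cases ic <;> simp [runA, ih, fSpec, holdRun]
    | 1 => cases ic <;> simp [runA, ih, fSpec, holdRun]
    | (n + 2) =>
      cases ic <;> simp [runA, ih, fSpec, holdRun]
      ring_nf

-- first boundary of bndC i cs (with sentinel) sits at index i + holdRun cs
theorem bnd_head (cs : List Nat) : ∀ (i : Int),
    ((bndC i cs ++ [(i + (cs.length : Int), false)]).headD (0, false)).1 = i + holdRun cs := by
  induction cs with
  | nil => intro i; simp [bndC, holdRun]
  | cons c cs ih =>
    intro i
    match c with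
    | 0 => simp [bndC, holdRun]
    | 1 => simp [bndC, holdRun]
    | (n + 2) =>
      have hs : (i + (((n + 2 : Nat) :: cs).length : Int)) = (i + 1) + (cs.length : Int) := by
        simp only [List.length_cons]; push_cast; ring
      simp only [bndC, hs, ih (i + 1), holdRun]
      ring

-- the sentinel keeps the boundary list nonempty
theorem bnd_app_ne (l : List (Int × Bool)) (p : Int × Bool) : l ++ [p] ≠ [] := by
  simp

theorem emit_eq (cs : List Nat) : ∀ (i : Int),
    altEmit (bndC i cs ++ [(i + (cs.length : Int), false)]) = fSpec cs := by
  induction cs with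
  | nil => intro i; simp [bndC, fSpec, altEmit]
  | cons c cs ih =>
    intro i
    have hs : (i + ((c :: cs).length : Int)) = (i + 1) + (cs.length : Int) := by
      simp only [List.length_cons]; push_cast; ring
    obtain ⟨⟨j, b⟩, t, hL⟩ : ∃ p t, bndC (i + 1) cs ++ [((i + 1) + (cs.length : Int), false)] = p :: t := by
      rcases h : bndC (i + 1) cs ++ [((i + 1) + (cs.length : Int), false)] with _ | ⟨p, t⟩
      · exact absurd h (bnd_app_ne _ _)
      · exact ⟨p, t, rfl⟩
    have hj : j = (i + 1) + holdRun cs := by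
      have := bnd_head cs (i + 1)
      rw [hL] at this; simpa using this
    match c with
    | 0 =>
      simp only [bndC, hs, List.cons_append, hL, altEmit, fSpec]
      rw [← hL, ih]
      simp
    | 1 =>
      simp only [bndC, hs, List.cons_append, hL, altEmit, fSpec]
      rw [← hL, ih, hj]
      have : (i + 1) + holdRun cs - i = 1 + holdRun cs := by ring
      simp [this]
    | (n + 2) =>
      simp only [bndC, hs, fSpec]
      exact ih (i + 1)

-- ===== VERDICT (by name: the statement is the Claim_ definition above) =====
theorem chord_lengths_spec : Claim_equal_chord_lengths := by
  intro ts _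
  unfold Spec_chord_lengths chord_lengths chord_lengths_alt
  rw [bridgeA, bridgeB, runA_eq]
  have := emit_eq (ts.map clsOf) 0
  simp only [List.length_map, zero_add] at this
  rw [this]
  simp
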